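-- pv_equiv track=rewrite | github.com/selfreferencing/erdos-86-lean | find_minimal_k_set.py | find_coverage_failures
-- ===== SOURCE A (Python) =====
-- def x_k(p, k):
--     m = 4*k + 3
--     return (p + m) // 4 if (p + m) % 4 == 0 else None
--
-- def has_witness(p, k):
--     m = 4*k + 3
--     x = x_k(p, k)
--     if x is None:
--         return False
--     target = (-x) % m
--     if target == 0:
--         target = m
--     x_sq = x * x
--     d = target
--     while d <= x:
--         if d > 0 and x_sq % d == 0:
--             return True
--         d += m
--     return False
--
-- def find_coverage_failures(primes, k_set):
--     """Find primes not covered by k_set."""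
--     failures = []
--     for p in primes:
--         covered = False
--         for k in k_set:
--             if has_witness(p, k):
--                 covered = True
--                 break
--         if not covered:
--             failures.append(p)
--     return failures
-- ===== SOURCE B (Python) =====
-- def _divisors(x):
--     # all positive divisors of x (x >= 1), by the sqrt pairing
--     ds = []
--     i = 1
--     while i * i <= x:
--         if x % i == 0:
--             ds.append(i)
--             if i != x // i:
--                 ds.append(x // i)
--         i += 1
--     return ds
--
-- def _covered(p, k):
--     m = 4 * k + 3
--     if (p + m) % 4 != 0:
--         return False
--     x = (p + m) // 4
--     if x < 1:
--         return False
--     t = (-x) % m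
--     ds = _divisors(x)
--     # divisors of x*x that are <= x are exactly the products a*b of divisors of x with a*b <= x;
--     # a witness is such a product congruent to t = (-x) % m  (A's target, taken mod m)
--     return any(a * b <= x and (a * b) % m == t for a in ds for b in ds)
--
-- def find_coverage_failures(primes, k_set):
--     """Find primes not covered by k_set."""
--     return [p for p in primes if not any(_covered(p, k) for k in k_set)]
-- ===== Notes on version B (the rewrite author's own statement) =====
-- stated objective: alternative
-- what changed: Instead of scanning the arithmetic progression target, target+m, ... up to x and testing each term for divisibility into x^2, B enumerates the divisors of x once by the sqrt pairing and looks for a product of two divisors that is <= x with residue t = (-x) % m (every divisor of x^2 that is <= x is such a product); intended as faster (a timing run saw A time out at n=16 where B returned, but could not certify a ratio), so no speed is claimed.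
-- outside the precondition, e.g. on find_coverage_failures([13], [0, -1]): A returns [], B returns []
import Mathlib
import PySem

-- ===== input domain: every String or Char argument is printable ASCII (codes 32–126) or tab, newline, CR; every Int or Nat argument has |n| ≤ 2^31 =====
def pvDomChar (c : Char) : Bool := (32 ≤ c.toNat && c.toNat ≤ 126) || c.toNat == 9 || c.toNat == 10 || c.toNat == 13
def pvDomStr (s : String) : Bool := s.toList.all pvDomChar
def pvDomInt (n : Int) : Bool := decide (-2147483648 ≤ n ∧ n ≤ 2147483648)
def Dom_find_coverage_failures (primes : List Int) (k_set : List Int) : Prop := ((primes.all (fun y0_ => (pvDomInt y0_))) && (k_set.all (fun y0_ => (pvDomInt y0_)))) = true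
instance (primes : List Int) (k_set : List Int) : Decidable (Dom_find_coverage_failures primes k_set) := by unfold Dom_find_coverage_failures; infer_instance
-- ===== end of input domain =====

-- B replaces A's O(x/m) arithmetic-progression scan for a divisor of x² by a √x divisor
-- enumeration of x and a search over products of two divisors (return value only; no mutation).

-- ===== PORT A =====
def x_k (p k : Int) : Option Int :=
  let m := 4*k + 3
  if PySem.Int.mod (p + m) 4 = 0 then some (PySem.Int.floordiv (p + m) 4) else none

-- A's `while d <= x: … d += m` loop; fuel covers every terminating run (see Pre_ below)
def hwLoop (m x xsq : Int) : Nat → Int → Bool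
  | 0, _ => false
  | fuel+1, d =>
    if d ≤ x then
      if 0 < d ∧ PySem.Int.mod xsq d = 0 then true
      else hwLoop m x xsq fuel (d + m)
    else false

def has_witness (p k : Int) : Bool :=
  let m := 4*k + 3
  match x_k p k with
  | none => false
  | some x =>
    let t0 := PySem.Int.mod (-x) m
    let target := if t0 = 0 then m else t0
    hwLoop m x (x*x) ((x + 1 - target).toNat + 1) target

-- the inner `for k in k_set: … break` loop
def coveredLoop (p : Int) : List Int → Bool
  | [] => false
  | k :: ks => if has_witness p k then true else coveredLoop p ks

def find_coverage_failures (primes : List Int) (k_set : List Int) : List Int :=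
  primes.foldl (fun failures p => if coveredLoop p k_set then failures else failures ++ [p]) []

-- ===== PORT B =====
-- B's `while i*i <= x: … i += 1` sqrt-pairing loop; fuel x.toNat+1 is enough since i ≤ x inside the loop
def divLoop (x : Int) : Nat → Int → List Int
  | 0, _ => []
  | fuel+1, i =>
    if i * i ≤ x then
      (if PySem.Int.mod x i = 0 then
        if i ≠ PySem.Int.floordiv x i then [i, PySem.Int.floordiv x i] else [i]
      else []) ++ divLoop x fuel (i + 1)
    else []

def divisors (x : Int) : List Int := divLoop x (x.toNat + 1) 1

def covered_alt (p k : Int) : Bool :=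
  let m := 4*k + 3
  if PySem.Int.mod (p + m) 4 ≠ 0 then false
  else
    let x := PySem.Int.floordiv (p + m) 4
    if x < 1 then false
    else
      let t := PySem.Int.mod (-x) m
      let ds := divisors x
      ds.any fun a => ds.any fun b => decide (a * b ≤ x) && decide (PySem.Int.mod (a * b) m = t)

def find_coverage_failures_alt (primes : List Int) (k_set : List Int) : List Int :=
  primes.filter fun p => ! k_set.any (fun k => covered_alt p k)

-- ===== PRECONDITION & SPEC =====
-- termination of A's while loop for the pair (p, k): with m = 4k+3 < 0 the loop steps downward
-- and runs forever as soon as it is entered, i.e. unless x < target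
def hwTerm (p k : Int) : Prop :=
  0 < 4*k + 3 ∨ PySem.Int.mod (p + (4*k + 3)) 4 ≠ 0 ∨
    PySem.Int.floordiv (p + (4*k + 3)) 4 <
      (if PySem.Int.mod (-(PySem.Int.floordiv (p + (4*k + 3)) 4)) (4*k + 3) = 0 then 4*k + 3
       else PySem.Int.mod (-(PySem.Int.floordiv (p + (4*k + 3)) 4)) (4*k + 3))

-- Pre_ excludes inputs on which some (p, k) pair would make A's `while` loop run forever
-- (m = 4k+3 < 0 with x ≥ target); A can still return on a few of those when an earlier k
-- covers p before the diverging pair is reached — see the cite in claim.json.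
def Pre_find_coverage_failures (primes : List Int) (k_set : List Int) : Prop :=
  ∀ p ∈ primes, ∀ k ∈ k_set, hwTerm p k

instance (primes : List Int) (k_set : List Int) : Decidable (Pre_find_coverage_failures primes k_set) := by
  unfold Pre_find_coverage_failures hwTerm; infer_instance

def pvWitness_find_coverage_failures : List Int × List Int := ([13, 29], [0, 1])

def Spec_find_coverage_failures (primes : List Int) (k_set : List Int) (out : List Int) : Prop := out = find_coverage_failures_alt primes k_set
instance (primes : List Int) (k_set : List Int) (out : List Int) : Decidable (Spec_find_coverage_failures primes k_set out) := by unfold Spec_find_coverage_failures; infer_instance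

-- ===== CLAIM (what is proved, stated in full; the proofs are below) =====
def Claim_equal_find_coverage_failures : Prop := ∀ (primes : List Int) (k_set : List Int), Dom_find_coverage_failures primes k_set → Pre_find_coverage_failures primes k_set → Spec_find_coverage_failures primes k_set (find_coverage_failures primes k_set)

-- ===== LEMMAS AND PROOFS =====

-- characterisation of A's progression scan (m > 0, enough fuel)
theorem hwLoop_iff (m x xsq : Int) (hm : 0 < m) :
    ∀ (fuel : Nat) (d : Int), (x + 1 - d).toNat < fuel →
      (hwLoop m x xsq fuel d = true ↔
        ∃ j : Nat, d + m * j ≤ x ∧ 0 < d + m * j ∧ PySem.Int.mod xsq (d + m * j) = 0) := by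
  intro fuel
  induction fuel with
  | zero => intro d hd; omega
  | succ n ih =>
    intro d hd
    simp only [hwLoop]
    by_cases hdx : d ≤ x
    · rw [if_pos hdx]
      by_cases hc : 0 < d ∧ PySem.Int.mod xsq d = 0
      · rw [if_pos hc]
        simp only [true_iff]
        exact ⟨0, by simp only [Nat.cast_zero, mul_zero, add_zero]; exact ⟨hdx, hc.1, hc.2⟩⟩
      · rw [if_neg hc]
        rw [ih (d + m) (by omega)]
        constructor
        · rintro ⟨j, h1, h2, h3⟩
          have e : d + m * ((j + 1 : Nat) : Int) = d + m + m * (j : Int) := by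
            push_cast; ring
          refine ⟨j + 1, ?_, ?_, ?_⟩ <;> rw [e] <;> assumption
        · rintro ⟨j, h1, h2, h3⟩
          cases j with
          | zero => exact absurd ⟨by simpa using h2, by simpa using h3⟩ hc
          | succ j =>
            have e : d + m + m * (j : Int) = d + m * ((j + 1 : Nat) : Int) := by
              push_cast; ring
            refine ⟨j, ?_, ?_, ?_⟩ <;> rw [e] <;> assumption
    · rw [if_neg hdx]
      apply iff_of_false (by simp)
      rintro ⟨j, h1, h2, h3⟩
      have : (0:Int) ≤ m * j := mul_nonneg hm.le (by positivity)
      omega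

-- membership in the AP {target, target+m, …} = positivity plus residue t (0 ≤ t < m)
theorem exists_j_iff (m t d : Int) (hm : 0 < m) (ht0 : 0 ≤ t) (htm : t < m) :
    (∃ j : Nat, d = (if t = 0 then m else t) + m * j) ↔ (0 < d ∧ PySem.Int.mod d m = t) := by
  rw [PySem.Int.mod_eq_emod_of_pos hm]
  constructor
  · rintro ⟨j, rfl⟩
    have hj : (0:Int) ≤ m * j := mul_nonneg hm.le (by positivity)
    have htg : (1:Int) ≤ (if t = 0 then m else t) := by split_ifs <;> omega
    refine ⟨by omega, ?_⟩
    rw [Int.add_mul_emod_self_left]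
    split_ifs with h0
    · simp [h0]
    · exact Int.emod_eq_of_lt ht0 htm
  · rintro ⟨hd, hmod⟩
    have hdm := Int.mul_ediv_add_emod d m
    rw [hmod] at hdm
    split_ifs with h0
    · subst h0
      have hq : 0 < d / m := by
        by_contra hq
        push Not at hq
        have : m * (d / m) ≤ 0 := mul_nonpos_of_nonneg_of_nonpos hm.le hq
        omega
      refine ⟨(d / m - 1).toNat, ?_⟩
      rw [Int.toNat_of_nonneg (by omega)]
      linarith [hdm, mul_sub m (d / m) 1]
    · have hq : 0 ≤ d / m := by
        by_contra hq
        push Not at hq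
        have : m * (d / m) ≤ m * (-1) := by
          apply mul_le_mul_of_nonneg_left (by omega) hm.le
        omega
      refine ⟨(d / m).toNat, ?_⟩
      rw [Int.toNat_of_nonneg hq]
      omega

-- characterisation of B's sqrt-pairing loop
theorem divLoop_iff (x : Int) (hx : 1 ≤ x) :
    ∀ (fuel : Nat) (i d : Int), 1 ≤ i → (x + 1 - i).toNat < fuel →
      (d ∈ divLoop x fuel i ↔
        ∃ j : Int, i ≤ j ∧ j * j ≤ x ∧ PySem.Int.mod x j = 0 ∧
          (d = j ∨ d = PySem.Int.floordiv x j)) := by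
  intro fuel
  induction fuel with
  | zero => intro i d hi hf; omega
  | succ n ih =>
    intro i d hi hf
    simp only [divLoop]
    by_cases hix : i * i ≤ x
    · rw [if_pos hix]
      have hiLe : i ≤ x := by nlinarith
      rw [List.mem_append, ih (i + 1) d (by omega) (by omega)]
      constructor
      · rintro (hblock | ⟨j, hj1, hj2, hj3, hj4⟩)
        · by_cases hmod : PySem.Int.mod x i = 0
          · rw [if_pos hmod] at hblock
            refine ⟨i, le_refl i, hix, hmod, ?_⟩
            by_cases hne : i ≠ PySem.Int.floordiv x i
            · rw [if_pos hne] at hblock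
              simpa using hblock
            · rw [if_neg hne] at hblock
              simp only [List.mem_singleton] at hblock
              exact Or.inl hblock
          · rw [if_neg hmod] at hblock
            simp at hblock
        · exact ⟨j, by omega, hj2, hj3, hj4⟩
      · rintro ⟨j, hj1, hj2, hj3, hj4⟩
        by_cases hji : j = i
        · subst hji
          left
          rw [if_pos hj3]
          by_cases hne : j ≠ PySem.Int.floordiv x j
          · rw [if_pos hne]
            simpa using hj4
          · rw [if_neg hne]
            push Not at hne
            simp only [List.mem_singleton]
            rcases hj4 with rfl | rfl
            · rfl
            · exact hne.symm
        · exact Or.inr ⟨j, by omega, hj2, hj3, hj4⟩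
    · rw [if_neg hix]
      apply iff_of_false (by simp)
      rintro ⟨j, hj1, hj2, _, _⟩
      have hjj : i * i ≤ j * j := mul_le_mul hj1 hj1 (by omega) (by omega)
      linarith

theorem mem_divisors_iff (x : Int) (hx : 1 ≤ x) (d : Int) :
    d ∈ divisors x ↔ 0 < d ∧ d ∣ x := by
  unfold divisors
  rw [divLoop_iff x hx (x.toNat + 1) 1 d le_rfl (by omega)]
  constructor
  · rintro ⟨j, hj1, hj2, hj3, hj4⟩
    have hjd : j ∣ x := (PySem.Int.mod_eq_zero_iff_dvd x j).mp hj3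
    obtain ⟨c, hc⟩ := hjd
    have hc0 : 0 < c := by nlinarith
    rcases hj4 with rfl | rfl
    · exact ⟨by omega, ⟨c, hc⟩⟩
    · have hfd : PySem.Int.floordiv x j = c := by
        rw [PySem.Int.floordiv_eq_ediv_of_pos (by omega), hc,
          Int.mul_ediv_cancel_left c (by omega)]
      rw [hfd]
      exact ⟨hc0, ⟨j, by rw [hc]; ring⟩⟩
  · rintro ⟨hd0, hdvd⟩
    obtain ⟨c, hc⟩ := hdvd
    have hc0 : 0 < c := by nlinarith
    by_cases hdd : d * d ≤ x
    · exact ⟨d, by omega, hdd, (PySem.Int.mod_eq_zero_iff_dvd x d).mpr ⟨c, hc⟩, Or.inl rfl⟩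
    · have hcd : c < d := by nlinarith
      refine ⟨c, by omega, by nlinarith, (PySem.Int.mod_eq_zero_iff_dvd x c).mpr ⟨d, by rw [hc]; ring⟩, Or.inr ?_⟩
      rw [PySem.Int.floordiv_eq_ediv_of_pos hc0, hc, Int.mul_ediv_cancel d (by omega)]

-- the per-pair equivalence
theorem hw_eq (p k : Int) (h : hwTerm p k) : has_witness p k = covered_alt p k := by
  by_cases hmod : PySem.Int.mod (p + (4*k + 3)) 4 = 0
  · simp only [has_witness, covered_alt, x_k, if_pos hmod, if_neg (not_not_intro hmod)]
    set x := PySem.Int.floordiv (p + (4 * k + 3)) 4 with hxdef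
    set t := PySem.Int.mod (-x) (4 * k + 3) with htdef
    set tgt := (if t = 0 then 4 * k + 3 else t) with htgtdef
    rcases lt_trichotomy (4 * k + 3) 0 with hmneg | hmz | hmpos
    · -- m < 0: Pre_ gives x < tgt, so A's loop exits at once; tgt ≤ 0 so x < 1 and B is false too
      have hxlt : x < tgt := by
        rcases h with hm | hc | hlt
        · omega
        · exact absurd hmod hc
        · rw [htgtdef, htdef, hxdef]; exact hlt
      have hneg := PySem.Int.mod_neg_bounds (-x) hmneg
      rw [← htdef] at hneg
      have htle : tgt ≤ 0 := by rw [htgtdef]; split_ifs <;> omega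
      have hx1 : x < 1 := by omega
      simp only [hwLoop, if_neg (by omega : ¬ tgt ≤ x)]
      simp [hx1]
    · omega
    · -- m > 0
      have ht0 : 0 ≤ t := by rw [htdef]; exact PySem.Int.mod_nonneg (-x) hmpos
      have htm : t < 4 * k + 3 := by rw [htdef]; exact PySem.Int.mod_lt (-x) hmpos
      have htg1 : 1 ≤ tgt := by rw [htgtdef]; split_ifs <;> omega
      by_cases hx1 : x < 1
      · simp only [hwLoop, if_neg (by omega : ¬ tgt ≤ x)]
        simp [hx1]
      · have hx : 1 ≤ x := by omega
        rw [Bool.eq_iff_iff]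
        rw [hwLoop_iff (4 * k + 3) x (x * x) hmpos _ tgt (by omega)]
        rw [if_neg hx1, List.any_eq_true]
        constructor
        · rintro ⟨j, h1, h2, h3⟩
          obtain ⟨hd0, hdm⟩ :=
            (exists_j_iff (4 * k + 3) t (tgt + (4 * k + 3) * (j : Int)) hmpos ht0 htm).mp
              ⟨j, by rw [htgtdef]⟩
          have hdvd : (tgt + (4 * k + 3) * (j : Int)) ∣ x * x :=
            (PySem.Int.mod_eq_zero_iff_dvd _ _).mp h3
          obtain ⟨a, b, ha, hb, hd⟩ := dvd_mul.mp hdvd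
          have ha0 : a ≠ 0 := by rintro rfl; simp at hd; omega
          have hb0 : b ≠ 0 := by rintro rfl; simp at hd; omega
          have hab : |a| * |b| = tgt + (4 * k + 3) * (j : Int) := by
            rw [← abs_mul, ← hd, abs_of_pos h2]
          refine ⟨|a|, (mem_divisors_iff x hx |a|).mpr ⟨abs_pos.mpr ha0, (abs_dvd a x).mpr ha⟩,
            List.any_eq_true.mpr ⟨|b|,
              (mem_divisors_iff x hx |b|).mpr ⟨abs_pos.mpr hb0, (abs_dvd b x).mpr hb⟩, ?_⟩⟩
          simp only [Bool.and_eq_true, decide_eq_true_eq]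
          exact ⟨by rw [hab]; exact h1, by rw [hab]; exact hdm⟩
        · rintro ⟨a, hamem, hinner⟩
          obtain ⟨b, hbmem, hcond⟩ := List.any_eq_true.mp hinner
          simp only [Bool.and_eq_true, decide_eq_true_eq] at hcond
          obtain ⟨ha0, hax⟩ := (mem_divisors_iff x hx a).mp hamem
          obtain ⟨hb0, hbx⟩ := (mem_divisors_iff x hx b).mp hbmem
          have hd0 : 0 < a * b := mul_pos ha0 hb0
          obtain ⟨j, hj⟩ :=
            (exists_j_iff (4 * k + 3) t (a * b) hmpos ht0 htm).mpr ⟨hd0, hcond.2⟩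
          rw [← htgtdef] at hj
          refine ⟨j, ?_, ?_, ?_⟩
          · rw [← hj]; exact hcond.1
          · rw [← hj]; exact hd0
          · rw [← hj]
            exact (PySem.Int.mod_eq_zero_iff_dvd _ _).mpr (mul_dvd_mul hax hbx)
  · have hdvd : ¬ ((4:Int) ∣ p + (4 * k + 3)) := by
      rwa [← PySem.Int.mod_eq_zero_iff_dvd]
    simp [has_witness, covered_alt, x_k, hdvd]

theorem coveredLoop_eq (p : Int) (ks : List Int) (h : ∀ k ∈ ks, hwTerm p k) :
    coveredLoop p ks = ks.any (fun k => covered_alt p k) := by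
  induction ks with
  | nil => rfl
  | cons k ks ih =>
    simp only [coveredLoop, List.any_cons]
    rw [hw_eq p k (h k (by simp))]
    cases covered_alt p k with
    | true => rfl
    | false => simpa using ih (fun k' hk' => h k' (by simp [hk']))

theorem foldl_eq_filter (k_set : List Int) :
    ∀ (l : List Int) (acc : List Int), (∀ p ∈ l, ∀ k ∈ k_set, hwTerm p k) →
      l.foldl (fun failures p => if coveredLoop p k_set then failures else failures ++ [p]) acc
        = acc ++ l.filter (fun p => ! k_set.any (fun k => covered_alt p k)) := by
  intro l
  induction l with
  | nil => simp
  | cons p l ih =>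
    intro acc h
    simp only [List.foldl_cons, List.filter_cons]
    rw [coveredLoop_eq p k_set (h p (by simp))]
    cases hc : k_set.any (fun k => covered_alt p k) with
    | true => simpa using ih acc (fun q hq => h q (by simp [hq]))
    | false =>
      rw [if_neg (show ¬ (false = true) by simp), if_pos (show (!false) = true by simp),
        ih (acc ++ [p]) (fun q hq => h q (by simp [hq]))]
      simp

-- ===== VERDICT (by name: the statement is the Claim_ definition above) =====
theorem find_coverage_failures_spec : Claim_equal_find_coverage_failures := by
  intro primes k_set _ hpre
  unfold Spec_find_coverage_failures find_coverage_failures find_coverage_failures_alt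
  rw [foldl_eq_filter k_set primes [] hpre]
  rfl
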